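-- pv_equiv track=rewrite | github.com/mdberkey/advent-of-code-2024 | 22/p2.py | get_prices_and_diffs
-- ===== SOURCE A (Python) =====
-- def get_prices_and_diffs(secret_num, n):
--     prices_and_diffs = [(secret_num % 10, None)]
--     for i in range(1, n):
--         secret_num ^= secret_num * 64
--         secret_num %= 16777216
--         secret_num ^= secret_num // 32
--         secret_num %= 16777216
--         secret_num ^= secret_num * 2048
--         secret_num %= 16777216
--         price = secret_num % 10
--
--         prices_and_diffs.append((price, price - prices_and_diffs[i-1][0]))
--
--     return prices_and_diffs
-- ===== SOURCE B (Python) =====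
-- M = 16777216  # 2**24
--
--
-- def _step(s):
--     # the secret update, used only to build the 24 matrix columns below
--     s = (s ^ (s * 64)) % M
--     s = (s ^ (s // 32)) % M
--     s = (s ^ (s * 2048)) % M
--     return s
--
--
-- # The update is linear over GF(2) on 24-bit states (xor of shifted copies,
-- # masked to 24 bits), so it is determined by its value on the 24 basis bits.
-- _COLS = [_step(1 << j) for j in range(24)]
--
--
-- def get_prices_and_diffs(secret_num, n):
--     out = [(secret_num % 10, None)]
--     prev = secret_num % 10
--     s = secret_num % M
--     for _ in range(n - 1):
--         t = 0
--         for j in range(24):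
--             if (s >> j) & 1:
--                 t ^= _COLS[j]
--         p = t % 10
--         out.append((p, p - prev))
--         prev = p
--         s = t
--     return out
-- ===== Notes on version B (the rewrite author's own statement) =====
-- stated objective: alternative
-- what changed: B exploits that the xor-shift secret update is a linear map over GF(2)^24: it precomputes the map's 24 matrix columns once and advances the 24-bit state by XOR-accumulating the columns selected by the state's set bits (a table-driven GF(2) matrix-vector product), instead of A's per-iteration shift/xor/mod formulas indexing back into the growing result list.
import Mathlib
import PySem

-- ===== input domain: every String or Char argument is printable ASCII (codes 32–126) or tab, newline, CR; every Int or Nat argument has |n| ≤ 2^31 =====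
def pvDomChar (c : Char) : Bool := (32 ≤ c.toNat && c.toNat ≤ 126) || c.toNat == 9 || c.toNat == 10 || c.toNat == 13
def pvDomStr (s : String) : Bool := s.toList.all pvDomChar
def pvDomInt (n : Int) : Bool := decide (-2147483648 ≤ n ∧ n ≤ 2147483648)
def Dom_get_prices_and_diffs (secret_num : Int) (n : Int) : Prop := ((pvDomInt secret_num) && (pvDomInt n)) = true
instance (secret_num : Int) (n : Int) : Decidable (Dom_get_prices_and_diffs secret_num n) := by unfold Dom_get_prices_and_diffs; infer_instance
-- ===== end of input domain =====

-- B replaces A's per-iteration shift/xor/mod secret update by a table-driven GF(2)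
-- matrix-vector product: the update is linear on 24-bit states, so B precomputes its 24
-- columns once and XOR-accumulates the columns selected by the state's set bits
-- (objective: alternative algorithm, same asymptotic cost).

-- ===== PORT A =====
def get_prices_and_diffs (secret_num : Int) (n : Int) : List (Int × Option Int) :=
  ((PySem.List.pyRange 1 n 1).foldl
    (fun (st : Int × List (Int × Option Int)) i =>
      let s1 := PySem.Int.mod (PySem.Int.bxor st.1 (st.1 * 64)) 16777216
      let s2 := PySem.Int.mod (PySem.Int.bxor s1 (PySem.Int.floordiv s1 32)) 16777216
      let s3 := PySem.Int.mod (PySem.Int.bxor s2 (s2 * 2048)) 16777216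
      let price := PySem.Int.mod s3 10
      -- prices_and_diffs[i-1] never raises (the list has length i); default is unreachable
      (s3, st.2 ++ [(price, some (price - (PySem.List.pyGetD st.2 (i - 1) ((0:Int), (none : Option Int))).1))]))
    (secret_num, [(PySem.Int.mod secret_num 10, none)])).2

-- ===== PORT B =====
-- Source B's module-level _step (used only to build the 24 columns)
def pvStepB (s : Int) : Int :=
  let s1 := PySem.Int.mod (PySem.Int.bxor s (s * 64)) 16777216
  let s2 := PySem.Int.mod (PySem.Int.bxor s1 (PySem.Int.floordiv s1 32)) 16777216
  PySem.Int.mod (PySem.Int.bxor s2 (s2 * 2048)) 16777216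

-- Source B's module-level _COLS = [_step(1 << j) for j in range(24)]; j ≥ 0 so '1 << j' is '1 <<< j.toNat'
def pvCols : List Int := (PySem.List.pyRange 0 24 1).map (fun j => pvStepB ((1 : Int) <<< j.toNat))

def get_prices_and_diffs_alt (secret_num : Int) (n : Int) : List (Int × Option Int) :=
  ((PySem.List.pyRange 0 (n - 1) 1).foldl
    (fun (st : List (Int × Option Int) × Int × Int) _ =>
      -- t = 0; for j in range(24): if (s >> j) & 1: t ^= _COLS[j]   (j ≥ 0, s ≥ 0; _COLS[j] never raises)
      let t := (PySem.List.pyRange 0 24 1).foldl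
        (fun t j => if PySem.Int.band (st.2.2 >>> j.toNat) 1 ≠ 0
                    then PySem.Int.bxor t (PySem.List.pyGetD pvCols j 0) else t) 0
      let p := PySem.Int.mod t 10
      (st.1 ++ [(p, some (p - st.2.1))], p, t))
    ([(PySem.Int.mod secret_num 10, none)], PySem.Int.mod secret_num 10,
      PySem.Int.mod secret_num 16777216)).1

-- ===== PRECONDITION & SPEC =====
def Spec_get_prices_and_diffs (secret_num : Int) (n : Int) (out : List (Int × Option Int)) : Prop := out = get_prices_and_diffs_alt secret_num n
instance (secret_num : Int) (n : Int) (out : List (Int × Option Int)) : Decidable (Spec_get_prices_and_diffs secret_num n out) := by unfold Spec_get_prices_and_diffs; infer_instance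

-- ===== CLAIM (what is proved, stated in full; the proofs are below) =====
def Claim_equal_get_prices_and_diffs : Prop := ∀ (secret_num : Int) (n : Int), Dom_get_prices_and_diffs secret_num n → Spec_get_prices_and_diffs secret_num n (get_prices_and_diffs secret_num n)

-- ===== LEMMAS AND PROOFS =====

-- A's secret-update step (proof-only characterisation; port A inlines it)
def pvStep (s : Int) : Int :=
  let s1 := PySem.Int.mod (PySem.Int.bxor s (s * 64)) 16777216
  let s2 := PySem.Int.mod (PySem.Int.bxor s1 (PySem.Int.floordiv s1 32)) 16777216
  PySem.Int.mod (PySem.Int.bxor s2 (s2 * 2048)) 16777216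

-- the same step on Nat, in shift form
def pvNstep (x : Nat) : Nat :=
  let a := (x ^^^ (x <<< 6)) % 16777216
  let b := (a ^^^ (a >>> 5)) % 16777216
  (b ^^^ (b <<< 11)) % 16777216

-- the k prices generated after the initial one
def pvTail (s : Int) : Nat → List Int
  | 0 => []
  | k + 1 => PySem.Int.mod (pvStep s) 10 :: pvTail (pvStep s) k

-- adjacent diffs of a price list, given the previous price
def pvAdj (prev : Int) : List Int → List (Int × Option Int)
  | [] => []
  | c :: t => (c, some (c - prev)) :: pvAdj c t

-- A's loop body / B's loop body, named for the lemmas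
def pvAbody (st : Int × List (Int × Option Int)) (i : Int) : Int × List (Int × Option Int) :=
  let s1 := PySem.Int.mod (PySem.Int.bxor st.1 (st.1 * 64)) 16777216
  let s2 := PySem.Int.mod (PySem.Int.bxor s1 (PySem.Int.floordiv s1 32)) 16777216
  let s3 := PySem.Int.mod (PySem.Int.bxor s2 (s2 * 2048)) 16777216
  let price := PySem.Int.mod s3 10
  (s3, st.2 ++ [(price, some (price - (PySem.List.pyGetD st.2 (i - 1) ((0:Int), (none : Option Int))).1))])

def pvMat (s : Int) : Int :=
  (PySem.List.pyRange 0 24 1).foldl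
    (fun t j => if PySem.Int.band (s >>> j.toNat) 1 ≠ 0
                then PySem.Int.bxor t (PySem.List.pyGetD pvCols j 0) else t) 0

def pvBbody (st : List (Int × Option Int) × Int × Int) (_i : Int) : List (Int × Option Int) × Int × Int :=
  let t := pvMat st.2.2
  let p := PySem.Int.mod t 10
  (st.1 ++ [(p, some (p - st.2.1))], p, t)

-- ---- Nat-side facts about the step ----
lemma pow24 : (16777216 : Nat) = 2^24 := by norm_num

lemma pvNstep_lt (x : Nat) : pvNstep x < 16777216 := Nat.mod_lt _ (by norm_num)

lemma pvStage1_mod (x : Nat) : ((x % 16777216) ^^^ ((x % 16777216) <<< 6)) % 16777216 = (x ^^^ (x <<< 6)) % 16777216 := by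
  rw [pow24, Nat.xor_mod_two_pow, Nat.xor_mod_two_pow, Nat.mod_mod_of_dvd _ dvd_rfl,
    Nat.mod_two_pow_shiftLeft_mod_two_pow]

lemma pvNstep_mod (x : Nat) : pvNstep (x % 16777216) = pvNstep x := by
  simp only [pvNstep, pvStage1_mod]

lemma pvXor4 (a b c d : Nat) : (a ^^^ b) ^^^ (c ^^^ d) = (a ^^^ c) ^^^ (b ^^^ d) := by
  apply Nat.eq_of_testBit_eq; intro i
  simp only [Nat.testBit_xor]
  cases a.testBit i <;> cases b.testBit i <;> cases c.testBit i <;> cases d.testBit i <;> rfl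

-- one xor-with-shift stage is GF(2)-linear
lemma pvStageL (f : Nat → Nat) (hf : ∀ x y, f (x ^^^ y) = f x ^^^ f y) (x y : Nat) :
    ((x ^^^ y) ^^^ f (x ^^^ y)) % 16777216 = ((x ^^^ f x) % 16777216) ^^^ ((y ^^^ f y) % 16777216) := by
  rw [hf, pow24, ← Nat.xor_mod_two_pow, pvXor4]

-- the whole step is GF(2)-linear
lemma pvNstep_xor (x y : Nat) : pvNstep (x ^^^ y) = pvNstep x ^^^ pvNstep y := by
  simp only [pvNstep]
  rw [pvStageL (· <<< 6) (fun a b => Nat.shiftLeft_xor_distrib ..) x y,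
      pvStageL (· >>> 5) (fun a b => Nat.shiftRight_xor_distrib ..),
      pvStageL (· <<< 11) (fun a b => Nat.shiftLeft_xor_distrib ..)]

lemma pvMod_succ_xor (x k : Nat) :
    x % 2 ^ (k + 1) = (x % 2 ^ k) ^^^ (if x.testBit k then 2 ^ k else 0) := by
  apply Nat.eq_of_testBit_eq; intro i
  by_cases h1 : i = k
  · subst h1
    by_cases h : x.testBit i <;>
      simp [Nat.testBit_mod_two_pow, Nat.testBit_xor, Nat.testBit_two_pow, h]
  · have he : (i < k + 1) ↔ (i < k) := by omega
    by_cases h : x.testBit k <;>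
      simp [Nat.testBit_mod_two_pow, Nat.testBit_xor, Nat.testBit_two_pow, h, he, Ne.symm h1]

lemma pvNstep_zero : pvNstep 0 = 0 := rfl

-- XOR-accumulating the step's images of the set bits computes the step (bit decomposition)
lemma pvBits_fold (k x : Nat) :
    (List.range k).foldl (fun t j => if x.testBit j then t ^^^ pvNstep (2 ^ j) else t) 0
      = pvNstep (x % 2 ^ k) := by
  induction k with
  | zero => simp [Nat.mod_one, pvNstep_zero]
  | succ k ih =>
    rw [List.range_succ, List.foldl_append, ih, List.foldl_cons, List.foldl_nil,
      pvMod_succ_xor, pvNstep_xor]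
    by_cases h : x.testBit k <;> simp [h, pvNstep_zero]

-- stage 2+3 of the step
def pvNstep23 (a : Nat) : Nat :=
  let b := (a ^^^ (a >>> 5)) % 16777216
  (b ^^^ (b <<< 11)) % 16777216

lemma pvNstep_eq_23 (x : Nat) : pvNstep x = pvNstep23 ((x ^^^ (x <<< 6)) % 16777216) := rfl

-- stage 1 on a negative input -(a+1), written through Python's two's-complement xor
lemma pvNeg_stage1 (a : Nat) :
    (a ^^^ (64 * a + 63)) % 16777216
      = ((16777215 - a % 16777216) ^^^ ((16777215 - a % 16777216) <<< 6)) % 16777216 := by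
  have hlt : a % 2 ^ 24 < 2 ^ 24 := Nat.mod_lt _ (by norm_num)
  have h64 : 64 * a + 63 = 2 ^ 6 * a + 63 := by norm_num
  rw [pow24]
  have ht : (16777215 - a % 2 ^ 24) = 2 ^ 24 - (a % 2 ^ 24 + 1) := by omega
  rw [ht, h64]
  apply Nat.eq_of_testBit_eq; intro i
  simp only [Nat.testBit_mod_two_pow, Nat.testBit_xor, Nat.testBit_shiftLeft,
    Nat.testBit_two_pow_mul_add a (by norm_num : (63:Nat) < 2 ^ 6),
    Nat.testBit_two_pow_sub_succ hlt, Nat.testBit_mod_two_pow]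
  by_cases h24 : i < 24
  · by_cases h6 : i < 6
    · have h63 : Nat.testBit 63 i = true := by interval_cases i <;> rfl
      simp [h24, h6, h63, show ¬ (6:Nat) ≤ i from by omega]
    · have e1 : (6:Nat) ≤ i := by omega
      have e2 : i - 6 < 24 := by omega
      simp [h24, h6, e1, e2]
  · simp [h24]

-- ---- Int → Nat transfer for the step ----
lemma st1 (m : Nat) (c : Nat) : PySem.Int.mod (PySem.Int.bxor (m:Int) ((m:Int) * (2^c : Nat))) 16777216 = (((m ^^^ m <<< c) % 16777216 : Nat) : Int) := by
  have h : ((m:Int) * (2^c : Nat)) = ((m <<< c : Nat) : Int) := by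
    rw [Nat.shiftLeft_eq]; push_cast; ring
  rw [h, PySem.Int.bxor_natCast]
  rw [show (16777216:Int) = ((16777216:Nat):Int) from by norm_num, PySem.Int.mod_natCast]

lemma st2 (m : Nat) : PySem.Int.mod (PySem.Int.bxor (m:Int) (PySem.Int.floordiv (m:Int) 32)) 16777216 = (((m ^^^ m >>> 5) % 16777216 : Nat) : Int) := by
  have h : PySem.Int.floordiv (m:Int) 32 = ((m >>> 5 : Nat) : Int) := by
    rw [show (32:Int) = ((32:Nat):Int) from by norm_num, PySem.Int.floordiv_natCast]
    rw [Nat.shiftRight_eq_div_pow]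
  rw [h, PySem.Int.bxor_natCast]
  rw [show (16777216:Int) = ((16777216:Nat):Int) from by norm_num, PySem.Int.mod_natCast]

lemma pvStep_natCast (x : Nat) : pvStep (x : Int) = (pvNstep x : Nat) := by
  show PySem.Int.mod _ _ = _
  rw [show ((64:Int)) = (((2^6 : Nat) : Int)) from by norm_num]
  rw [st1 x 6]
  rw [st2]
  rw [show ((2048:Int)) = (((2^11 : Nat) : Int)) from by norm_num]
  rw [st1 _ 11]
  rfl

lemma pvModM_natCast (m : Nat) : PySem.Int.mod (m : Int) 16777216 = ((m % 16777216 : Nat) : Int) := by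
  rw [show (16777216:Int) = ((16777216:Nat):Int) from by norm_num, PySem.Int.mod_natCast]

lemma pvMod_toNat_natCast (x : Nat) : (PySem.Int.mod (x : Int) 16777216).toNat = x % 16777216 := by
  rw [show (16777216:Int) = ((16777216:Nat):Int) from by norm_num, PySem.Int.mod_natCast]
  exact Int.toNat_natCast _

-- A's step on ANY int equals the Nat step of the 24-bit residue (Python two's complement)
lemma pvStep_eq_nstep_mod (s : Int) :
    pvStep s = ((pvNstep ((PySem.Int.mod s 16777216).toNat) : Nat) : Int) := by
  by_cases hs0 : 0 ≤ s
  · lift s to Nat using hs0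
    rw [pvStep_natCast, pvMod_toNat_natCast, pvNstep_mod]
  · have hs : s < 0 := by omega
    -- s < 0 : Python's xor of two negative ints
    set a : Nat := (-s - 1).toNat with ha
    have hsa : s = -((a : Int) + 1) := by simp [ha]; omega
    have hbx : PySem.Int.bxor s (s * 64) = ((a ^^^ (64 * a + 63) : Nat) : Int) := by
      rw [PySem.Int.bxor]
      rw [if_neg (by omega), if_neg (by rw [hsa]; omega)]
      rw [show (-(s * 64) - 1).toNat = 64 * a + 63 from by omega]
    have hmodt : PySem.Int.mod s 16777216 = ((16777215 - a % 16777216 : Nat) : Int) := by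
      rw [PySem.Int.mod_eq_emod_of_pos (by norm_num), hsa]
      have h1 : a % 16777216 < 16777216 := Nat.mod_lt _ (by norm_num)
      omega
    simp only [pvStep]
    rw [hbx, pvModM_natCast]
    rw [st2, show ((2048:Int)) = (((2^11 : Nat) : Int)) from by norm_num, st1 _ 11]
    rw [hmodt, Int.toNat_natCast, pvNstep_eq_23, pvNeg_stage1]
    rfl

-- ---- the matrix product computes the step ----
lemma pvCols_eq : pvCols = (List.range 24).map (fun j => ((pvNstep (2 ^ j) : Nat) : Int)) := by decide

lemma pvBitCond (x j : Nat) : (PySem.Int.band ((x:Int) >>> ((j:Nat):Int)) 1 ≠ 0) ↔ x.testBit j := by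
  rw [Int.shiftRight_natCast,
      show (1:Int) = ((1:Nat):Int) from rfl, PySem.Int.band_natCast,
      Nat.and_one_is_mod, Nat.shiftRight_eq_div_pow, Nat.testBit_eq_decide_div_mod_eq]
  rw [Ne, Int.natCast_eq_zero, decide_eq_true_iff]
  omega

lemma pvCastFold (x : Nat) (l : List Nat) : ∀ (acc : Nat),
    l.foldl (fun t k => if x.testBit k then PySem.Int.bxor t ((pvNstep (2 ^ k) : Nat) : Int) else t) ((acc : Nat) : Int)
      = ((l.foldl (fun t k => if x.testBit k then t ^^^ pvNstep (2 ^ k) else t) acc : Nat) : Int) := by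
  induction l with
  | nil => intro acc; rfl
  | cons a l ih =>
    intro acc
    simp only [List.foldl_cons]
    by_cases h : x.testBit a <;> simp [h, PySem.Int.bxor_natCast, ih]

lemma pvMat_eq_step (x : Nat) (hx : x < 16777216) : pvMat (x : Int) = ((pvNstep x : Nat) : Int) := by
  unfold pvMat
  rw [show (24:Int) = ((24:Nat):Int) from rfl, PySem.List.pyRange_zero_natCast, List.foldl_map]
  have hbody : ∀ (t : Int) (k : Nat), k ∈ List.range 24 →
      (fun (t : Int) (k : Nat) =>
        if PySem.Int.band ((x:Int) >>> ((((k : Int)).toNat : Nat) : Int)) 1 ≠ 0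
        then PySem.Int.bxor t (PySem.List.pyGetD pvCols (k : Int) 0) else t) t k
        = (fun (t : Int) (k : Nat) =>
            if x.testBit k then PySem.Int.bxor t ((pvNstep (2 ^ k) : Nat) : Int) else t) t k := by
    intro t k hk
    have hk24 : k < 24 := List.mem_range.mp hk
    simp only [Int.toNat_natCast]
    have hget : PySem.List.pyGetD pvCols (k : Int) 0 = ((pvNstep (2 ^ k) : Nat) : Int) := by
      rw [PySem.List.pyGetD_natCast, pvCols_eq, PySem.List.getD_map_range _ _ _ _ hk24]
    rw [hget]
    by_cases h : x.testBit k
    · rw [if_pos ((pvBitCond x k).mpr h), if_pos h]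
    · rw [if_neg (fun hc => h ((pvBitCond x k).mp hc)), if_neg h]
  rw [PySem.List.foldl_congr_mem _ _ _ _ hbody]
  rw [show (0 : Int) = ((0 : Nat) : Int) from rfl, pvCastFold]
  rw [pvBits_fold 24 x, ← pow24, Nat.mod_eq_of_lt hx]

-- ---- A characterisation (loop invariant) ----
lemma pvA_inv (k : Nat) : ∀ (s : Int) (pre : List (Int × Option Int)) (x : Int × Option Int),
    x.1 = PySem.Int.mod s 10 →
    ((PySem.List.pyRange ((pre.length + 1 : Nat) : Int) (((pre.length + 1 : Nat) : Int) + k) 1).foldl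
        pvAbody (s, pre ++ [x])).2
      = (pre ++ [x]) ++ pvAdj (PySem.Int.mod s 10) (pvTail s k) := by
  induction k with
  | zero => intro s pre x hx; simp [pvTail, pvAdj, PySem.List.pyRange_one_eq_nil]
  | succ k ih =>
    intro s pre x hx
    rw [PySem.List.pyRange_one_cons (by omega)]
    simp only [List.foldl_cons]
    have hidx : PySem.List.pyGetD (pre ++ [x]) (((pre.length + 1 : Nat) : Int) - 1)
        ((0:Int), (none : Option Int)) = x := by
      have h1 : (((pre.length + 1 : Nat) : Int) - 1) = ((pre.length : Nat) : Int) := by push_cast; ring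
      rw [h1, PySem.List.pyGetD_natCast]
      simp [List.getD]
    have hbody : pvAbody (s, pre ++ [x]) ((pre.length + 1 : Nat) : Int)
        = (pvStep s, (pre ++ [x]) ++
            [(PySem.Int.mod (pvStep s) 10, some (PySem.Int.mod (pvStep s) 10 - PySem.Int.mod s 10))]) := by
      simp only [pvAbody, pvStep, hidx, hx]
    rw [hbody]
    have harg : (((pre.length + 1 : Nat) : Int) + 1)
        = (((pre ++ [x]).length + 1 : Nat) : Int) := by push_cast; simp
    have harg2 : (((pre.length + 1 : Nat) : Int) + (k + 1 : Nat))
        = (((pre ++ [x]).length + 1 : Nat) : Int) + (k : Nat) := by push_cast; simp; ring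
    rw [harg, harg2]
    rw [ih (pvStep s) (pre ++ [x])
      (PySem.Int.mod (pvStep s) 10, some (PySem.Int.mod (pvStep s) 10 - PySem.Int.mod s 10)) rfl]
    simp [pvTail, pvAdj]

lemma pvA_char (s n : Int) :
    get_prices_and_diffs s n
      = (PySem.Int.mod s 10, none) :: pvAdj (PySem.Int.mod s 10) (pvTail s (n - 1).toNat) := by
  rw [show get_prices_and_diffs s n
      = ((PySem.List.pyRange 1 n 1).foldl pvAbody (s, [(PySem.Int.mod s 10, none)])).2 from rfl]
  by_cases h : n ≤ 1
  · rw [PySem.List.pyRange_one_eq_nil h]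
    have h0 : (n - 1).toNat = 0 := by omega
    simp [h0, pvTail, pvAdj]
  · have hn1 : (1 : Int) = ((([] : List (Int × Option Int)).length + 1 : Nat) : Int) := by simp
    have hn : n = ((([] : List (Int × Option Int)).length + 1 : Nat) : Int) + ((n - 1).toNat : Nat) := by
      simp; omega
    rw [hn1, hn]
    have := pvA_inv (n - 1).toNat s [] (PySem.Int.mod s 10, none) rfl
    simpa using this

-- ---- B characterisation ----
lemma pvStep_nonneg_lt (t : Int) : 0 ≤ pvStep t ∧ pvStep t < 16777216 := by
  rw [pvStep_eq_nstep_mod]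
  constructor
  · positivity
  · exact_mod_cast pvNstep_lt _

lemma pvMat_eq_pvStep (t : Int) (h0 : 0 ≤ t) (hM : t < 16777216) : pvMat t = pvStep t := by
  have ht : t = ((t.toNat : Nat) : Int) := by omega
  have hx : t.toNat < 16777216 := by omega
  rw [ht, pvMat_eq_step _ hx, pvStep_natCast]

lemma pvB_inv (l : List Int) : ∀ (t prev : Int) (out : List (Int × Option Int)),
    0 ≤ t → t < 16777216 →
    (l.foldl pvBbody (out, prev, t)).1 = out ++ pvAdj prev (pvTail t l.length) := by
  induction l with
  | nil => intro t prev out _ _; simp [pvTail, pvAdj]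
  | cons a l ih =>
    intro t prev out h0 hM
    simp only [List.foldl_cons, List.length_cons]
    have hb : pvBbody (out, prev, t) a
        = (out ++ [(PySem.Int.mod (pvStep t) 10, some (PySem.Int.mod (pvStep t) 10 - prev))],
           PySem.Int.mod (pvStep t) 10, pvStep t) := by
      simp only [pvBbody, pvMat_eq_pvStep t h0 hM]
    rw [hb, ih _ _ _ (pvStep_nonneg_lt t).1 (pvStep_nonneg_lt t).2]
    simp [pvTail, pvAdj]

lemma pvModM_idem (s : Int) :
    PySem.Int.mod (PySem.Int.mod s 16777216) 16777216 = PySem.Int.mod s 16777216 := by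
  rw [PySem.Int.mod_eq_emod_of_pos (by norm_num), PySem.Int.mod_eq_emod_of_pos (by norm_num)]
  exact Int.emod_emod_of_dvd _ dvd_rfl

lemma pvStep_mod (s : Int) : pvStep (PySem.Int.mod s 16777216) = pvStep s := by
  rw [pvStep_eq_nstep_mod, pvStep_eq_nstep_mod s, pvModM_idem]

lemma pvTail_mod (k : Nat) (s : Int) : pvTail (PySem.Int.mod s 16777216) k = pvTail s k := by
  cases k with
  | zero => rfl
  | succ k => simp only [pvTail, pvStep_mod]

lemma pvB_char (s n : Int) :
    get_prices_and_diffs_alt s n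
      = (PySem.Int.mod s 10, none) :: pvAdj (PySem.Int.mod s 10) (pvTail s (n - 1).toNat) := by
  rw [show get_prices_and_diffs_alt s n
      = ((PySem.List.pyRange 0 (n - 1) 1).foldl pvBbody
          ([(PySem.Int.mod s 10, none)], PySem.Int.mod s 10, PySem.Int.mod s 16777216)).1 from rfl]
  rw [pvB_inv _ _ _ _ (PySem.Int.mod_nonneg _ (by norm_num)) (PySem.Int.mod_lt _ (by norm_num))]
  rw [PySem.List.length_pyRange_one, show (n - 1 - 0 : Int) = n - 1 from by ring, pvTail_mod]
  rfl

-- ===== VERDICT (by name: the statement is the Claim_ definition above) =====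
theorem get_prices_and_diffs_spec : Claim_equal_get_prices_and_diffs := by
  intro s n _
  unfold Spec_get_prices_and_diffs
  rw [pvA_char, pvB_char]
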